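-- pv_equiv track=rewrite | github.com/armtsf/data-communication | Source and Channel Coding/convolutional.py | convolutional_encode
-- ===== SOURCE A (Python) =====
-- def convolutional_encode(plain_bits):
-- 	states = {'00' : (('0', '00', '00'), ('1', '11', '10')), '10' : (('0', '11', '01'), ('1', '00', '11')),
-- 			'11' : (('0', '01', '01'), ('1', '10', '11')), '01' : (('0', '10', '00'), ('1', '01', '10'))}
-- 	enc_bits = ""
-- 	state = '00'
-- 	for p in plain_bits:
-- 		move = states[state]
-- 		if (p == '0'):
-- 			enc_bits = enc_bits + move[0][1]
-- 			state = move[0][2]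
-- 		else:
-- 			enc_bits = enc_bits + move[1][1]
-- 			state = move[1][2]
-- 	return enc_bits
-- ===== SOURCE B (Python) =====
-- def convolutional_encode(plain_bits):
--     # Two integer register bits replace the string state and transition table;
--     # any character other than '0' counts as input bit 1, as in the original.
--     m1 = 0
--     m2 = 0
--     out = []
--     for p in plain_bits:
--         u = 0 if p == '0' else 1
--         out.append(str(u ^ m1 ^ m2))
--         out.append(str(u ^ m1))
--         m2 = m1
--         m1 = u
--     return ''.join(out)
-- ===== Notes on version B (the rewrite author's own statement) =====
-- stated objective: simpler
-- what changed: Replaces the 4-state string/transition-dict state machine by two integer register bits updated with XOR arithmetic (u^m1^m2, u^m1) and a shift, collecting output bits in a list joined at the end.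
import Mathlib
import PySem

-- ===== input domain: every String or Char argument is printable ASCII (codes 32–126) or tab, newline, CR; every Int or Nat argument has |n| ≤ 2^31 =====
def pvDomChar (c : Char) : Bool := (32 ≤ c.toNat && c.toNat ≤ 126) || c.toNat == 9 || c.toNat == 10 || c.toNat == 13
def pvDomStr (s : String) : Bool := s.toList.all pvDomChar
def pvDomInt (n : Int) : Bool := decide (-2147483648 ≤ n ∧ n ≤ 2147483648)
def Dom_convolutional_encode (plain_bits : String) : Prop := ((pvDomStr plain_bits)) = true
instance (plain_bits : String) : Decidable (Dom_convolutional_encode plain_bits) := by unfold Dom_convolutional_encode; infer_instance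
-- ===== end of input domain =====

-- B replaces A's string-state/transition-dict machine by two integer register bits
-- updated with XOR arithmetic (objective: simpler).

-- ===== PORT A =====
-- the transition table 'states' of A; type of a move: (input, output bits, next state)
def pvStates : PySem.Dict String ((String × String × String) × (String × String × String)) :=
  PySem.Dict.ofList
    [ ("00", (("0", "00", "00"), ("1", "11", "10")))
    , ("10", (("0", "11", "01"), ("1", "00", "11")))
    , ("11", (("0", "01", "01"), ("1", "10", "11")))
    , ("01", (("0", "10", "00"), ("1", "01", "10"))) ]

-- the for-loop of A; enc_bits kept as List Char (string concatenation = list append, exact);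
-- states[state] never raises (state is always one of the four keys), so getD's default is unreachable
def pvALoop (cs : List Char) (state : String) (enc : List Char) : List Char :=
  match cs with
  | [] => enc
  | p :: rest =>
    let move := pvStates.getD state (("0", "00", "00"), ("0", "00", "00"))
    if p = '0' then
      pvALoop rest move.1.2.2 (enc ++ move.1.2.1.toList)
    else
      pvALoop rest move.2.2.2 (enc ++ move.2.2.1.toList)

def convolutional_encode (plain_bits : String) : String :=
  String.ofList (pvALoop plain_bits.toList "00" [])

-- ===== PORT B =====
-- the for-loop of B: two register bits m1 m2, output bits appended to a list
def pvBLoop (cs : List Char) (m1 m2 : Int) : List String :=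
  match cs with
  | [] => []
  | p :: rest =>
    let u : Int := if p = '0' then 0 else 1
    PySem.Int.toStr (Int.xor (Int.xor u m1) m2) :: PySem.Int.toStr (Int.xor u m1) :: pvBLoop rest u m1

def convolutional_encode_alt (plain_bits : String) : String :=
  PySem.Str.join "" (pvBLoop plain_bits.toList 0 0)

-- ===== PRECONDITION & SPEC =====
def Spec_convolutional_encode (plain_bits : String) (out : String) : Prop := out = convolutional_encode_alt plain_bits
instance (plain_bits : String) (out : String) : Decidable (Spec_convolutional_encode plain_bits out) := by unfold Spec_convolutional_encode; infer_instance

-- ===== CLAIM (what is proved, stated in full; the proofs are below) =====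
def Claim_equal_convolutional_encode : Prop := ∀ (plain_bits : String), Dom_convolutional_encode plain_bits → Spec_convolutional_encode plain_bits (convolutional_encode plain_bits)

-- ===== LEMMAS AND PROOFS =====

-- the string state of A that corresponds to B's register bits (m1, m2)
def pvStateOf (m1 m2 : Int) : String :=
  if m1 = 0 then (if m2 = 0 then "00" else "01") else (if m2 = 0 then "10" else "11")

-- ''.join over a cons
theorem pvJoinNilCons (p : List Char) (rest : List (List Char)) :
    PySem.Chars.join [] (p :: rest) = p ++ PySem.Chars.join [] rest := by
  cases rest with
  | nil => simp [PySem.Chars.join, List.intercalate]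
  | cons q r => rw [PySem.Chars.join_cons_cons]; simp

-- loop invariant: A's loop from the state encoding (m1, m2) produces enc ++ B's remaining output
theorem pvLoopAgree (cs : List Char) (m1 m2 : Int)
    (h1 : m1 = 0 ∨ m1 = 1) (h2 : m2 = 0 ∨ m2 = 1) (enc : List Char) :
    pvALoop cs (pvStateOf m1 m2) enc
      = enc ++ PySem.Chars.join [] ((pvBLoop cs m1 m2).map String.toList) := by
  induction cs generalizing m1 m2 enc with
  | nil => simp [pvALoop, pvBLoop, PySem.Chars.join_nil]
  | cons p rest ih =>
    rcases h1 with h1 | h1 <;> rcases h2 with h2 | h2 <;> subst h1 <;> subst h2 <;>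
        (by_cases hp : (p = '0'))
    · -- m1 = 0, m2 = 0, p = '0'
      simp only [pvALoop, pvBLoop, hp, reduceIte]
      rw [show (pvStates.getD (pvStateOf 0 0) (("0", "00", "00"), ("0", "00", "00"))).1.2.2 = "00" from rfl,
        show (pvStates.getD (pvStateOf 0 0) (("0", "00", "00"), ("0", "00", "00"))).1.2.1 = "00" from rfl,
        show (∀ e, pvALoop rest "00" e
            = e ++ PySem.Chars.join [] ((pvBLoop rest 0 0).map String.toList)) from
          fun e => ih 0 0 (Or.inl rfl) (Or.inl rfl) e]
      simp [show ("00" : String).toList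
          = (PySem.Int.toStr (Int.xor (Int.xor 0 0) 0)).toList
            ++ (PySem.Int.toStr (Int.xor 0 0)).toList from rfl, List.append_assoc, pvJoinNilCons]
    · -- m1 = 0, m2 = 0, p ≠ '0'
      simp only [pvALoop, pvBLoop, hp, reduceIte]
      rw [show (pvStates.getD (pvStateOf 0 0) (("0", "00", "00"), ("0", "00", "00"))).2.2.2 = "10" from rfl,
        show (pvStates.getD (pvStateOf 0 0) (("0", "00", "00"), ("0", "00", "00"))).2.2.1 = "11" from rfl,
        show (∀ e, pvALoop rest "10" e
            = e ++ PySem.Chars.join [] ((pvBLoop rest 1 0).map String.toList)) from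
          fun e => ih 1 0 (Or.inr rfl) (Or.inl rfl) e]
      simp [show ("11" : String).toList
          = (PySem.Int.toStr (Int.xor (Int.xor 1 0) 0)).toList
            ++ (PySem.Int.toStr (Int.xor 1 0)).toList from rfl, List.append_assoc, pvJoinNilCons]
    · -- m1 = 0, m2 = 1, p = '0'
      simp only [pvALoop, pvBLoop, hp, reduceIte]
      rw [show (pvStates.getD (pvStateOf 0 1) (("0", "00", "00"), ("0", "00", "00"))).1.2.2 = "00" from rfl,
        show (pvStates.getD (pvStateOf 0 1) (("0", "00", "00"), ("0", "00", "00"))).1.2.1 = "10" from rfl,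
        show (∀ e, pvALoop rest "00" e
            = e ++ PySem.Chars.join [] ((pvBLoop rest 0 0).map String.toList)) from
          fun e => ih 0 0 (Or.inl rfl) (Or.inl rfl) e]
      simp [show ("10" : String).toList
          = (PySem.Int.toStr (Int.xor (Int.xor 0 0) 1)).toList
            ++ (PySem.Int.toStr (Int.xor 0 0)).toList from rfl, List.append_assoc, pvJoinNilCons]
    · -- m1 = 0, m2 = 1, p ≠ '0'
      simp only [pvALoop, pvBLoop, hp, reduceIte]
      rw [show (pvStates.getD (pvStateOf 0 1) (("0", "00", "00"), ("0", "00", "00"))).2.2.2 = "10" from rfl,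
        show (pvStates.getD (pvStateOf 0 1) (("0", "00", "00"), ("0", "00", "00"))).2.2.1 = "01" from rfl,
        show (∀ e, pvALoop rest "10" e
            = e ++ PySem.Chars.join [] ((pvBLoop rest 1 0).map String.toList)) from
          fun e => ih 1 0 (Or.inr rfl) (Or.inl rfl) e]
      simp [show ("01" : String).toList
          = (PySem.Int.toStr (Int.xor (Int.xor 1 0) 1)).toList
            ++ (PySem.Int.toStr (Int.xor 1 0)).toList from rfl, List.append_assoc, pvJoinNilCons]
    · -- m1 = 1, m2 = 0, p = '0'
      simp only [pvALoop, pvBLoop, hp, reduceIte]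
      rw [show (pvStates.getD (pvStateOf 1 0) (("0", "00", "00"), ("0", "00", "00"))).1.2.2 = "01" from rfl,
        show (pvStates.getD (pvStateOf 1 0) (("0", "00", "00"), ("0", "00", "00"))).1.2.1 = "11" from rfl,
        show (∀ e, pvALoop rest "01" e
            = e ++ PySem.Chars.join [] ((pvBLoop rest 0 1).map String.toList)) from
          fun e => ih 0 1 (Or.inl rfl) (Or.inr rfl) e]
      simp [show ("11" : String).toList
          = (PySem.Int.toStr (Int.xor (Int.xor 0 1) 0)).toList
            ++ (PySem.Int.toStr (Int.xor 0 1)).toList from rfl, List.append_assoc, pvJoinNilCons]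
    · -- m1 = 1, m2 = 0, p ≠ '0'
      simp only [pvALoop, pvBLoop, hp, reduceIte]
      rw [show (pvStates.getD (pvStateOf 1 0) (("0", "00", "00"), ("0", "00", "00"))).2.2.2 = "11" from rfl,
        show (pvStates.getD (pvStateOf 1 0) (("0", "00", "00"), ("0", "00", "00"))).2.2.1 = "00" from rfl,
        show (∀ e, pvALoop rest "11" e
            = e ++ PySem.Chars.join [] ((pvBLoop rest 1 1).map String.toList)) from
          fun e => ih 1 1 (Or.inr rfl) (Or.inr rfl) e]
      simp [show ("00" : String).toList
          = (PySem.Int.toStr (Int.xor (Int.xor 1 1) 0)).toList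
            ++ (PySem.Int.toStr (Int.xor 1 1)).toList from rfl, List.append_assoc, pvJoinNilCons]
    · -- m1 = 1, m2 = 1, p = '0'
      simp only [pvALoop, pvBLoop, hp, reduceIte]
      rw [show (pvStates.getD (pvStateOf 1 1) (("0", "00", "00"), ("0", "00", "00"))).1.2.2 = "01" from rfl,
        show (pvStates.getD (pvStateOf 1 1) (("0", "00", "00"), ("0", "00", "00"))).1.2.1 = "01" from rfl,
        show (∀ e, pvALoop rest "01" e
            = e ++ PySem.Chars.join [] ((pvBLoop rest 0 1).map String.toList)) from
          fun e => ih 0 1 (Or.inl rfl) (Or.inr rfl) e]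
      simp [show ("01" : String).toList
          = (PySem.Int.toStr (Int.xor (Int.xor 0 1) 1)).toList
            ++ (PySem.Int.toStr (Int.xor 0 1)).toList from rfl, List.append_assoc, pvJoinNilCons]
    · -- m1 = 1, m2 = 1, p ≠ '0'
      simp only [pvALoop, pvBLoop, hp, reduceIte]
      rw [show (pvStates.getD (pvStateOf 1 1) (("0", "00", "00"), ("0", "00", "00"))).2.2.2 = "11" from rfl,
        show (pvStates.getD (pvStateOf 1 1) (("0", "00", "00"), ("0", "00", "00"))).2.2.1 = "10" from rfl,
        show (∀ e, pvALoop rest "11" e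
            = e ++ PySem.Chars.join [] ((pvBLoop rest 1 1).map String.toList)) from
          fun e => ih 1 1 (Or.inr rfl) (Or.inr rfl) e]
      simp [show ("10" : String).toList
          = (PySem.Int.toStr (Int.xor (Int.xor 1 1) 1)).toList
            ++ (PySem.Int.toStr (Int.xor 1 1)).toList from rfl, List.append_assoc, pvJoinNilCons]

-- ===== VERDICT (by name: the statement is the Claim_ definition above) =====
theorem convolutional_encode_spec : Claim_equal_convolutional_encode := by
  intro pb _
  unfold Spec_convolutional_encode convolutional_encode convolutional_encode_alt
  rw [show ("00" : String) = pvStateOf 0 0 from rfl,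
    pvLoopAgree _ _ _ (Or.inl rfl) (Or.inl rfl)]
  simp [PySem.Str.join, String.ofList]
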